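-- pv_equiv track=rewrite | github.com/corundum/corundum | fpga/lib/pcie/tb/pcie.py | byte_mask_update
-- ===== SOURCE A (Python) =====
-- def byte_mask_update(old, mask, new, bitmask=-1):
--     new = (new & bitmask) | (old & ~bitmask)
--     m1 = 1
--     m2 = 0xff
--     while mask >= m1:
--         if mask & m1:
--             old = (old & ~m2) | (new & m2)
--         m1 <<= 1
--         m2 <<= 8
--     return old
-- ===== SOURCE B (Python) =====
-- def byte_mask_update(old, mask, new, bitmask=-1):
--     new = (new & bitmask) | (old & ~bitmask)
--     return _merge(old, mask, new)
--
-- def _merge(old, mask, new):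
--     # Recurse byte by byte: pick this byte from new or old per the low mask bit,
--     # shift everything right and rebuild the result from the low byte up.
--     if mask <= 0:
--         return old
--     low = (new if mask & 1 else old) & 0xff
--     return (_merge(old >> 8, mask >> 1, new >> 8) << 8) | low
-- ===== Notes on version B (the rewrite author's own statement) =====
-- stated objective: alternative
-- what changed: B replaces A's iterative scan with growing power-of-two bit/byte masks by a structural recursion on mask that shifts old/new/mask right each step, selects each low byte from new or old, and rebuilds the result from the low byte up with (rec << 8) | low.
import Mathlib
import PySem

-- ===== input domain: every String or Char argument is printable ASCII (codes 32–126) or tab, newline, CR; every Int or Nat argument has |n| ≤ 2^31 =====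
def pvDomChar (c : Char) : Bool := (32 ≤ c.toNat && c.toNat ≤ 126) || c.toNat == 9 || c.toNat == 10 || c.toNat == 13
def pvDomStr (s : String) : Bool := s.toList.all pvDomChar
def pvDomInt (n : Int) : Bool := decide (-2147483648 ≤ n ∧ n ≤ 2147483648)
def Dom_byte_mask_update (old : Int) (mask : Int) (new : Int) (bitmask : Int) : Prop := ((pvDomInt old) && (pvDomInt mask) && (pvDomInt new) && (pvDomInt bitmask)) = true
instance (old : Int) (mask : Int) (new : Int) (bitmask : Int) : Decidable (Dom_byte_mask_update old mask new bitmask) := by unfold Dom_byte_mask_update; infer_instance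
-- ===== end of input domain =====

-- B replaces A's iterative scan with growing bit/byte masks (m1, m2) by a structural
-- recursion on mask that shifts old/new/mask right and rebuilds the result from the
-- low byte up (objective: alternative).

-- ===== PORT A =====
-- the while loop of A; m1 and m2 are Python-nonnegative loop variables (1, 0xff at entry,
-- shifted left each round), carried as Nat with the invariant 0 < m1 for termination
def pvLoopA (mask nw : Int) (old : Int) (m1 m2 : Nat) (hm : 0 < m1) : Int :=
  if _h : (m1 : Int) ≤ mask then
    pvLoopA mask nw
      (if PySem.Int.band mask (m1 : Int) ≠ 0 then
        PySem.Int.bor (PySem.Int.band old (Int.not (m2 : Int))) (PySem.Int.band nw (m2 : Int))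
      else old)
      (m1 <<< 1) (m2 <<< 8) (by simp [Nat.shiftLeft_eq]; omega)
  else old
termination_by mask.toNat + 1 - m1
decreasing_by simp only [Nat.shiftLeft_eq]; omega

def byte_mask_update (old : Int) (mask : Int) (new : Int) (bitmask : Int) : Int :=
  let nw := PySem.Int.bor (PySem.Int.band new bitmask) (PySem.Int.band old (Int.not bitmask))
  pvLoopA mask nw old 1 0xff (by decide)

-- ===== PORT B =====
-- Source B's _merge: recursion on mask, shifting old/mask/new right and rebuilding the
-- result from the low byte up; the low byte comes from new or old per the low mask bit
def pvMerge (old : Int) (mask : Int) (nw : Int) : Int :=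
  if _h : mask ≤ 0 then old
  else
    PySem.Int.bor ((pvMerge (old >>> (8:Nat)) (mask >>> (1:Nat)) (nw >>> (8:Nat))) <<< (8:Nat))
      (PySem.Int.band (if PySem.Int.band mask 1 ≠ 0 then nw else old) 0xff)
termination_by mask.toNat
decreasing_by
  rcases mask with m | m
  · have h1 : 0 < m := Nat.pos_of_ne_zero (fun h0 => _h (by simp [h0]))
    have h2 : (Int.ofNat m) >>> (1 : Nat) = Int.ofNat (m >>> 1) := rfl
    rw [h2]
    show m >>> 1 < m
    rw [Nat.shiftRight_eq_div_pow, pow_one]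
    omega
  · exact absurd (Int.negSucc_lt_zero m).le _h

def byte_mask_update_alt (old : Int) (mask : Int) (new : Int) (bitmask : Int) : Int :=
  let nw := PySem.Int.bor (PySem.Int.band new bitmask) (PySem.Int.band old (Int.not bitmask))
  pvMerge old mask nw

-- ===== PRECONDITION & SPEC =====
def Spec_byte_mask_update (old : Int) (mask : Int) (new : Int) (bitmask : Int) (out : Int) : Prop := out = byte_mask_update_alt old mask new bitmask
instance (old : Int) (mask : Int) (new : Int) (bitmask : Int) (out : Int) : Decidable (Spec_byte_mask_update old mask new bitmask out) := by unfold Spec_byte_mask_update; infer_instance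

-- ===== CLAIM (what is proved, stated in full; the proofs are below) =====
def Claim_equal_byte_mask_update : Prop := ∀ (old : Int) (mask : Int) (new : Int) (bitmask : Int), Dom_byte_mask_update old mask new bitmask → Spec_byte_mask_update old mask new bitmask (byte_mask_update old mask new bitmask)

-- ===== LEMMAS AND PROOFS =====

-- proof-only helper: the accumulated byte mask A's loop effectively applies,
-- in A's loop shape (m1 = 2^i, shift = 8*i)
def pvLoopB (mask : Int) (bytemask : Int) (m1 shift : Nat) (hm : 0 < m1) : Int :=
  if _h : (m1 : Int) ≤ mask then
    pvLoopB mask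
      (if PySem.Int.band mask (m1 : Int) ≠ 0 then
        PySem.Int.bor bytemask ((0xff : Int) <<< shift)
      else bytemask)
      (m1 <<< 1) (shift + 8) (by simp [Nat.shiftLeft_eq]; omega)
  else bytemask
termination_by mask.toNat + 1 - m1
decreasing_by simp only [Nat.shiftLeft_eq]; omega

-- proof-only helper: the same byte mask in B's recursion shape (mask shifted right)
def pvBM (mask : Int) : Int :=
  if _h : mask ≤ 0 then 0
  else
    PySem.Int.bor ((pvBM (mask >>> (1:Nat))) <<< (8:Nat)) (if PySem.Int.band mask 1 ≠ 0 then (255 : Int) else 0)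
termination_by mask.toNat
decreasing_by
  rcases mask with m | m
  · have h1 : 0 < m := Nat.pos_of_ne_zero (fun h0 => _h (by simp [h0]))
    have h2 : (Int.ofNat m) >>> (1 : Nat) = Int.ofNat (m >>> 1) := rfl
    rw [h2]
    show m >>> 1 < m
    rw [Nat.shiftRight_eq_div_pow, pow_one]
    omega
  · exact absurd (Int.negSucc_lt_zero m).le _h

-- Nat-level bit arithmetic
theorem pv_disj_add : ∀ m n : Nat, m &&& n = 0 → m + n = m ||| n := by
  intro m
  induction m using Nat.strong_induction_on with
  | _ m ih =>
    intro n h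
    rcases Nat.eq_zero_or_pos m with rfl | hm
    · simp
    · have h2 : m / 2 &&& n / 2 = 0 := by rw [← Nat.and_div_two, h]
      have ih2 := ih (m / 2) (Nat.div_lt_self hm (by norm_num)) (n / 2) h2
      have hod : (m ||| n) / 2 = m / 2 ||| n / 2 := Nat.or_div_two
      have t0 : ¬ (m % 2 = 1 ∧ n % 2 = 1) := by
        intro ⟨h1, h2'⟩
        have := congrArg (fun x => Nat.testBit x 0) h
        simp [Nat.testBit_land, Nat.testBit_zero, h1, h2'] at this
      have t1 : ((m ||| n) % 2 = 1) ↔ (m % 2 = 1 ∨ n % 2 = 1) := by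
        have := Nat.testBit_lor m n 0
        simp [Nat.testBit_zero] at this
        simpa [decide_eq_true_eq] using congrArg (· = true) this ▸ Iff.rfl
      omega

theorem pv_and_ldiff_disj (m n : Nat) : (m &&& n) &&& Nat.ldiff m n = 0 := by
  apply Nat.eq_of_testBit_eq
  intro i
  simp only [Nat.testBit_land, Nat.testBit_ldiff, Nat.zero_testBit]
  cases m.testBit i <;> cases n.testBit i <;> rfl

theorem pv_and_ldiff_or (m n : Nat) : (m &&& n) ||| Nat.ldiff m n = m := by
  apply Nat.eq_of_testBit_eq
  intro i
  simp only [Nat.testBit_lor, Nat.testBit_land, Nat.testBit_ldiff]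
  cases m.testBit i <;> cases n.testBit i <;> rfl

theorem pv_sub_and (m n : Nat) : m - (m &&& n) = Nat.ldiff m n := by
  have h1 := pv_disj_add _ _ (pv_and_ldiff_disj m n)
  have h2 := pv_and_ldiff_or m n
  omega

-- Int-level bit semantics: bit i of x in Python's infinite two's complement
def pvBit (x : Int) (i : Nat) : Bool :=
  match x with
  | .ofNat n => n.testBit i
  | .negSucc n => !(n.testBit i)

theorem pv_negSucc_nonpos (n : Nat) : ¬ (0:Int) ≤ Int.negSucc n :=
  not_le.mpr (Int.negSucc_lt_zero n)

theorem pv_negSucc_toNat (n : Nat) : (-(Int.negSucc n) - 1).toNat = n := by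
  rw [Int.negSucc_eq]
  have h : -(-((n:Int) + 1)) - 1 = (n:Int) := by ring
  rw [h, Int.toNat_natCast]

theorem pv_neg_cast_sub_one (k : Nat) : -((k:Int)) - 1 = Int.negSucc k := by
  rw [Int.negSucc_eq]; ring

theorem pv_ofNat_cast (n : Nat) : Int.ofNat n = (n : Int) := rfl

-- values of PySem.Int.band / bor on the two Int constructors
theorem pv_band_nn (m n : Nat) : PySem.Int.band (Int.ofNat m) (Int.ofNat n) = Int.ofNat (m &&& n) := by
  show PySem.Int.band (m:Int) (n:Int) = Int.ofNat (m &&& n)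
  unfold PySem.Int.band
  rw [if_pos (Int.natCast_nonneg m), if_pos (Int.natCast_nonneg n), Int.toNat_natCast, Int.toNat_natCast]
  rfl

theorem pv_band_ns (m n : Nat) : PySem.Int.band (Int.ofNat m) (Int.negSucc n) = Int.ofNat (Nat.ldiff m n) := by
  show PySem.Int.band (m:Int) (Int.negSucc n) = Int.ofNat (Nat.ldiff m n)
  unfold PySem.Int.band
  rw [if_pos (Int.natCast_nonneg m), if_neg (pv_negSucc_nonpos n), Int.toNat_natCast,
    pv_negSucc_toNat, pv_sub_and]
  rfl

theorem pv_band_sn (m n : Nat) : PySem.Int.band (Int.negSucc m) (Int.ofNat n) = Int.ofNat (Nat.ldiff n m) := by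
  show PySem.Int.band (Int.negSucc m) (n:Int) = Int.ofNat (Nat.ldiff n m)
  unfold PySem.Int.band
  rw [if_neg (pv_negSucc_nonpos m), if_pos (Int.natCast_nonneg n), Int.toNat_natCast,
    pv_negSucc_toNat, pv_sub_and]
  rfl

theorem pv_band_ss (m n : Nat) : PySem.Int.band (Int.negSucc m) (Int.negSucc n) = Int.negSucc (m ||| n) := by
  unfold PySem.Int.band
  rw [if_neg (pv_negSucc_nonpos m), if_neg (pv_negSucc_nonpos n), pv_negSucc_toNat,
    pv_negSucc_toNat, pv_neg_cast_sub_one]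

theorem pv_bor_nn (m n : Nat) : PySem.Int.bor (Int.ofNat m) (Int.ofNat n) = Int.ofNat (m ||| n) := by
  show PySem.Int.bor (m:Int) (n:Int) = Int.ofNat (m ||| n)
  unfold PySem.Int.bor
  rw [if_pos (Int.natCast_nonneg m), if_pos (Int.natCast_nonneg n), Int.toNat_natCast, Int.toNat_natCast]
  rfl

theorem pv_bor_ns (m n : Nat) : PySem.Int.bor (Int.ofNat m) (Int.negSucc n) = Int.negSucc (Nat.ldiff n m) := by
  show PySem.Int.bor (m:Int) (Int.negSucc n) = Int.negSucc (Nat.ldiff n m)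
  unfold PySem.Int.bor
  rw [if_pos (Int.natCast_nonneg m), if_neg (pv_negSucc_nonpos n), Int.toNat_natCast,
    pv_negSucc_toNat, pv_sub_and, pv_neg_cast_sub_one]

theorem pv_bor_sn (m n : Nat) : PySem.Int.bor (Int.negSucc m) (Int.ofNat n) = Int.negSucc (Nat.ldiff m n) := by
  show PySem.Int.bor (Int.negSucc m) (n:Int) = Int.negSucc (Nat.ldiff m n)
  unfold PySem.Int.bor
  rw [if_neg (pv_negSucc_nonpos m), if_pos (Int.natCast_nonneg n), Int.toNat_natCast,
    pv_negSucc_toNat, pv_sub_and, pv_neg_cast_sub_one]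

theorem pv_bor_ss (m n : Nat) : PySem.Int.bor (Int.negSucc m) (Int.negSucc n) = Int.negSucc (m &&& n) := by
  unfold PySem.Int.bor
  rw [if_neg (pv_negSucc_nonpos m), if_neg (pv_negSucc_nonpos n), pv_negSucc_toNat,
    pv_negSucc_toNat, pv_neg_cast_sub_one]

theorem pvBit_not (x : Int) (i : Nat) : pvBit (Int.not x) i = !(pvBit x i) := by
  rcases x with n | n <;> simp [pvBit, Int.not]

theorem pvBit_band (a b : Int) (i : Nat) :
    pvBit (PySem.Int.band a b) i = (pvBit a i && pvBit b i) := by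
  rcases a with m | m <;> rcases b with n | n
  · rw [pv_band_nn]
    show (m &&& n).testBit i = (m.testBit i && n.testBit i)
    exact Nat.testBit_land m n i
  · rw [pv_band_ns]
    show (Nat.ldiff m n).testBit i = (m.testBit i && !(n.testBit i))
    exact Nat.testBit_ldiff m n i
  · rw [pv_band_sn]
    show (Nat.ldiff n m).testBit i = (!(m.testBit i) && n.testBit i)
    rw [Nat.testBit_ldiff]
    cases m.testBit i <;> cases n.testBit i <;> rfl
  · rw [pv_band_ss]
    show (!((m ||| n).testBit i)) = (!(m.testBit i) && !(n.testBit i))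
    rw [Nat.testBit_lor]
    cases m.testBit i <;> cases n.testBit i <;> rfl

theorem pvBit_bor (a b : Int) (i : Nat) :
    pvBit (PySem.Int.bor a b) i = (pvBit a i || pvBit b i) := by
  rcases a with m | m <;> rcases b with n | n
  · rw [pv_bor_nn]
    show (m ||| n).testBit i = (m.testBit i || n.testBit i)
    exact Nat.testBit_lor m n i
  · rw [pv_bor_ns]
    show (!((Nat.ldiff n m).testBit i)) = (m.testBit i || !(n.testBit i))
    rw [Nat.testBit_ldiff]
    cases m.testBit i <;> cases n.testBit i <;> rfl
  · rw [pv_bor_sn]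
    show (!((Nat.ldiff m n).testBit i)) = (!(m.testBit i) || n.testBit i)
    rw [Nat.testBit_ldiff]
    cases m.testBit i <;> cases n.testBit i <;> rfl
  · rw [pv_bor_ss]
    show (!((m &&& n).testBit i)) = (!(m.testBit i) || !(n.testBit i))
    rw [Nat.testBit_land]
    cases m.testBit i <;> cases n.testBit i <;> rfl

theorem pv_testBit_high {m : Nat} (i : Nat) (h : m ≤ i) : m.testBit i = false :=
  Nat.testBit_eq_false_of_lt
    (lt_of_lt_of_le Nat.lt_two_pow_self (Nat.pow_le_pow_right (by norm_num) h))

theorem pv_eq_of_bit {x y : Int} (h : ∀ i, pvBit x i = pvBit y i) : x = y := by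
  rcases x with m | m <;> rcases y with n | n
  · exact congrArg Int.ofNat (Nat.eq_of_testBit_eq fun i => h i)
  · exfalso
    have hi := h (m + n)
    rw [show pvBit (Int.ofNat m) (m + n) = m.testBit (m + n) from rfl,
      show pvBit (Int.negSucc n) (m + n) = !(n.testBit (m + n)) from rfl,
      pv_testBit_high (m + n) (by omega), pv_testBit_high (m + n) (by omega)] at hi
    exact absurd hi (by decide)
  · exfalso
    have hi := h (m + n)
    rw [show pvBit (Int.negSucc m) (m + n) = !(m.testBit (m + n)) from rfl,
      show pvBit (Int.ofNat n) (m + n) = n.testBit (m + n) from rfl,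
      pv_testBit_high (m + n) (by omega), pv_testBit_high (m + n) (by omega)] at hi
    exact absurd hi (by decide)
  · have : m = n := Nat.eq_of_testBit_eq fun i => by
      have hi := h i
      rw [show pvBit (Int.negSucc m) i = !(m.testBit i) from rfl,
        show pvBit (Int.negSucc n) i = !(n.testBit i) from rfl] at hi
      exact Bool.not_inj hi
    rw [this]

theorem pvBit_zero (i : Nat) : pvBit 0 i = false := by
  show (0:Nat).testBit i = false
  exact Nat.zero_testBit i

-- bits of shifts
theorem pvBit_shiftRight (x : Int) (n j : Nat) : pvBit (x >>> n) j = pvBit x (n + j) := by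
  rcases x with m | m
  · show (m >>> n).testBit j = m.testBit (n + j)
    exact Nat.testBit_shiftRight m
  · show (!((m >>> n).testBit j)) = (!(m.testBit (n + j)))
    rw [Nat.testBit_shiftRight]

theorem pvBit_shiftLeft (x : Int) (n j : Nat) :
    pvBit (x <<< n) j = if j < n then false else pvBit x (j - n) := by
  rcases x with m | m
  · show (m <<< n).testBit j = _
    rw [Nat.testBit_shiftLeft]
    rcases Nat.lt_or_ge j n with h | h
    · simp [h, Nat.not_le.mpr h]
    · simp [h, Nat.not_lt.mpr h]
      rfl
  · show (!(((m + 1) <<< n - 1).testBit j)) = _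
    have h1 : (1:Nat) ≤ 2 ^ n := Nat.one_le_two_pow
    have h2 : (m + 1) <<< n - 1 = 2 ^ n * m + (2 ^ n - 1) := by
      rw [Nat.shiftLeft_eq, Nat.add_mul, one_mul, Nat.mul_comm]
      omega
    rw [h2, Nat.testBit_two_pow_mul_add m (by omega) j]
    rcases Nat.lt_or_ge j n with h | h
    · simp [h, Nat.testBit_two_pow_sub_one]
    · simp only [if_neg (Nat.not_lt.mpr h)]
      show (!(m.testBit (j - n))) = _
      rfl

theorem pvBit_255 (j : Nat) : pvBit 255 j = decide (j < 8) := by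
  show (255:Nat).testBit j = decide (j < 8)
  rw [show (255:Nat) = 2 ^ 8 - 1 from rfl, Nat.testBit_two_pow_sub_one]

-- composing shifts
theorem pv_srr (x : Int) (a b : Nat) : (x >>> a) >>> b = x >>> (a + b) := by
  rcases x with m | m
  · show Int.ofNat ((m >>> a) >>> b) = Int.ofNat (m >>> (a + b))
    rw [Nat.shiftRight_add]
  · show Int.negSucc ((m >>> a) >>> b) = Int.negSucc (m >>> (a + b))
    rw [Nat.shiftRight_add]

theorem pv_sll (x : Int) (a b : Nat) : (x <<< a) <<< b = x <<< (a + b) := by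
  apply pv_eq_of_bit
  intro j
  simp only [pvBit_shiftLeft]
  rcases Nat.lt_or_ge j b with h | h
  · rw [if_pos h, if_pos (by omega : j < a + b)]
  · rw [if_neg (Nat.not_lt.mpr h)]
    rcases Nat.lt_or_ge (j - b) a with h' | h'
    · rw [if_pos h', if_pos (by omega : j < a + b)]
    · rw [if_neg (Nat.not_lt.mpr h'), if_neg (by omega : ¬ j < a + b)]
      congr 1
      omega

theorem pv_sl_zero (x : Int) : x <<< (0:Nat) = x := by
  rcases x with m | m
  · rfl
  · rfl

theorem pv_sr_zero (x : Int) : x >>> (0:Nat) = x := by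
  rcases x with m | m
  · rfl
  · rfl

theorem pv_zero_sl (n : Nat) : (0:Int) <<< n = 0 := by
  show Int.ofNat (0 <<< n) = Int.ofNat 0
  rw [Nat.zero_shiftLeft]

theorem pv_bor_sl (a b : Int) (n : Nat) :
    (PySem.Int.bor a b) <<< n = PySem.Int.bor (a <<< n) (b <<< n) := by
  apply pv_eq_of_bit
  intro j
  simp only [pvBit_bor, pvBit_shiftLeft]
  rcases Nat.lt_or_ge j n with h | h
  · simp [h]
  · simp [Nat.not_lt.mpr h]

-- bit-i characterisation of the loop conditions
theorem pv_band_pow2 (x : Int) (i : Nat) :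
    PySem.Int.band x (((2 ^ i : Nat) : Int)) = if pvBit x i then ((2 ^ i : Nat) : Int) else 0 := by
  rcases x with m | m
  · rw [show (((2 ^ i : Nat)) : Int) = Int.ofNat (2 ^ i) from rfl, pv_band_nn, Nat.and_two_pow]
    show Int.ofNat ((m.testBit i).toNat * 2 ^ i) = if m.testBit i then Int.ofNat (2 ^ i) else 0
    cases hm : m.testBit i <;> simp
  · rw [show (((2 ^ i : Nat)) : Int) = Int.ofNat (2 ^ i) from rfl, pv_band_sn]
    have hld : Nat.ldiff (2 ^ i) m = if m.testBit i then 0 else 2 ^ i := by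
      apply Nat.eq_of_testBit_eq
      intro j
      rw [Nat.testBit_ldiff, Nat.testBit_two_pow]
      by_cases hj : i = j
      · subst hj
        cases hm : m.testBit i <;> simp [hm]
      · cases hm : m.testBit i <;> simp [hm, hj, Nat.testBit_two_pow]
    rw [hld]
    show Int.ofNat _ = if !(m.testBit i) then Int.ofNat (2 ^ i) else 0
    cases hm : m.testBit i <;> simp [hm]

theorem pv_band_one (x : Int) :
    PySem.Int.band x 1 = if pvBit x 0 then 1 else 0 := by
  have := pv_band_pow2 x 0
  norm_num at this
  exact this

theorem pv_cond_pow2 (x : Int) (i : Nat) :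
    (PySem.Int.band x (((2 ^ i : Nat)) : Int) ≠ 0) ↔ pvBit x i = true := by
  rw [pv_band_pow2]
  have hp : (((2 ^ i : Nat)) : Int) ≠ 0 := by
    exact_mod_cast (Nat.two_pow_pos i).ne'
  cases h : pvBit x i <;> simp [hp]

-- merge algebra
theorem pv_merge_zero (old nw : Int) :
    PySem.Int.bor (PySem.Int.band old (Int.not 0)) (PySem.Int.band nw 0) = old := by
  apply pv_eq_of_bit
  intro i
  simp only [pvBit_bor, pvBit_band, pvBit_not, pvBit_zero]
  cases pvBit old i <;> cases pvBit nw i <;> rfl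

theorem pv_merge_merge (old nw a b : Int) :
    PySem.Int.bor (PySem.Int.band (PySem.Int.bor (PySem.Int.band old (Int.not a)) (PySem.Int.band nw a)) (Int.not b)) (PySem.Int.band nw b)
      = PySem.Int.bor (PySem.Int.band old (Int.not (PySem.Int.bor a b))) (PySem.Int.band nw (PySem.Int.bor a b)) := by
  apply pv_eq_of_bit
  intro i
  simp only [pvBit_bor, pvBit_band, pvBit_not]
  cases pvBit old i <;> cases pvBit nw i <;> cases pvBit a i <;> cases pvBit b i <;> rfl

theorem pv_bor_zero_left (x : Int) : PySem.Int.bor 0 x = x := by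
  rw [PySem.Int.bor_comm, PySem.Int.bor_zero]

theorem pv_bor_assoc (a b c : Int) :
    PySem.Int.bor (PySem.Int.bor a b) c = PySem.Int.bor a (PySem.Int.bor b c) := by
  apply pv_eq_of_bit
  intro i
  simp only [pvBit_bor]
  cases pvBit a i <;> cases pvBit b i <;> cases pvBit c i <;> rfl

-- B's loop with a general accumulator
theorem pvLoopB_acc (mask : Int) : ∀ fuel m1 shift : Nat, ∀ acc : Int, ∀ hm : 0 < m1,
    mask.toNat + 1 - m1 = fuel →
    pvLoopB mask acc m1 shift hm = PySem.Int.bor acc (pvLoopB mask 0 m1 shift hm) := by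
  intro fuel
  induction fuel using Nat.strong_induction_on with
  | _ fuel ih =>
    intro m1 shift acc hm hf
    conv_lhs => rw [pvLoopB]
    conv_rhs => rw [pvLoopB]
    by_cases h : (m1 : Int) ≤ mask
    · simp only [dif_pos h]
      have hlt : mask.toNat + 1 - (m1 <<< 1) < fuel := by
        have : 0 < mask := by omega
        simp only [Nat.shiftLeft_eq]
        omega
      by_cases hc : PySem.Int.band mask (m1 : Int) ≠ 0
      · simp only [if_pos hc]
        rw [ih _ hlt (m1 <<< 1) (shift + 8) (PySem.Int.bor acc ((0xff : Int) <<< shift)) _ rfl,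
          ih _ hlt (m1 <<< 1) (shift + 8) (PySem.Int.bor 0 ((0xff : Int) <<< shift)) _ rfl]
        rw [pv_bor_zero_left, pv_bor_assoc]
      · simp only [if_neg hc]
        exact ih _ hlt (m1 <<< 1) (shift + 8) acc _ rfl
    · simp only [dif_neg h]
      rw [PySem.Int.bor_zero]

-- the heart of the previous equivalence: A's loop = single merge with the byte mask
theorem pv_loop_eq (mask nw : Int) : ∀ fuel m1 shift : Nat, ∀ old : Int, ∀ hm : 0 < m1,
    mask.toNat + 1 - m1 = fuel →
    pvLoopA mask nw old m1 (255 <<< shift) hm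
      = PySem.Int.bor (PySem.Int.band old (Int.not (pvLoopB mask 0 m1 shift hm)))
          (PySem.Int.band nw (pvLoopB mask 0 m1 shift hm)) := by
  intro fuel
  induction fuel using Nat.strong_induction_on with
  | _ fuel ih =>
    intro m1 shift old hm hf
    rw [pvLoopA, pvLoopB]
    by_cases h : (m1 : Int) ≤ mask
    · simp only [dif_pos h]
      have hlt : mask.toNat + 1 - (m1 <<< 1) < fuel := by
        have : 0 < mask := by omega
        simp only [Nat.shiftLeft_eq]
        omega
      have hsh : (255 <<< shift) <<< 8 = 255 <<< (shift + 8) := by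
        simp [Nat.shiftLeft_eq, Nat.pow_add]
        ring
      have hcast : ((255 <<< shift : Nat) : Int) = (0xff : Int) <<< shift := by
        rw [Int.natCast_shiftLeft]
        norm_num
      rw [hsh]
      by_cases hc : PySem.Int.band mask (m1 : Int) ≠ 0
      · simp only [if_pos hc]
        rw [ih _ hlt (m1 <<< 1) (shift + 8) _ _ rfl]
        rw [pvLoopB_acc mask (mask.toNat + 1 - (m1 <<< 1)) (m1 <<< 1) (shift + 8)
          (PySem.Int.bor 0 ((0xff : Int) <<< shift)) _ rfl]
        rw [pv_bor_zero_left, hcast, pv_merge_merge]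
      · simp only [if_neg hc]
        exact ih _ hlt (m1 <<< 1) (shift + 8) old _ rfl
    · simp only [dif_neg h]
      rw [pv_merge_zero]

-- pvMerge = one merge with the byte mask pvBM (B-shaped)
theorem pvMerge_eq : ∀ fuel (mask old nw : Int), mask.toNat = fuel →
    pvMerge old mask nw
      = PySem.Int.bor (PySem.Int.band old (Int.not (pvBM mask))) (PySem.Int.band nw (pvBM mask)) := by
  intro fuel
  induction fuel using Nat.strong_induction_on with
  | _ fuel ih =>
    intro mask old nw hf
    rw [pvMerge, pvBM]
    by_cases h : mask ≤ 0
    · simp only [dif_pos h]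
      exact (pv_merge_zero old nw).symm
    · simp only [dif_neg h]
      have hlt : (mask >>> (1:Nat)).toNat < fuel := by
        rcases mask with m | m
        · have h1 : 0 < m := Nat.pos_of_ne_zero (fun h0 => h (by simp [h0]))
          rw [show (Int.ofNat m) >>> (1 : Nat) = Int.ofNat (m >>> 1) from rfl]
          subst hf
          show m >>> 1 < (Int.ofNat m).toNat
          rw [Nat.shiftRight_eq_div_pow, pow_one]
          show m / 2 < m
          omega
        · exact absurd (Int.negSucc_lt_zero m).le h
      rw [ih _ hlt (mask >>> (1:Nat)) (old >>> (8:Nat)) (nw >>> (8:Nat)) rfl]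
      by_cases hc : PySem.Int.band mask 1 ≠ 0
      · simp only [if_pos hc]
        apply pv_eq_of_bit
        intro j
        rcases Nat.lt_or_ge j 8 with hj | hj
        · simp [pvBit_bor, pvBit_band, pvBit_not, pvBit_shiftLeft, pvBit_255, pvBit_zero, hj]
        · simp only [pvBit_bor, pvBit_band, pvBit_not, pvBit_shiftLeft, pvBit_255, pvBit_zero,
            pvBit_shiftRight, if_neg (Nat.not_lt.mpr hj)]
          rw [show (8 + (j - 8)) = j from by omega]
          have hd : decide (j < 8) = false := by simp [Nat.not_lt.mpr hj]
          rw [hd]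
          cases pvBit old j <;> cases pvBit nw j <;>
            cases pvBit (pvBM (mask >>> (1:Nat))) (j - 8) <;> rfl
      · simp only [if_neg hc]
        apply pv_eq_of_bit
        intro j
        rcases Nat.lt_or_ge j 8 with hj | hj
        · simp [pvBit_bor, pvBit_band, pvBit_not, pvBit_shiftLeft, pvBit_255, pvBit_zero, hj]
        · simp only [pvBit_bor, pvBit_band, pvBit_not, pvBit_shiftLeft, pvBit_255, pvBit_zero,
            pvBit_shiftRight, if_neg (Nat.not_lt.mpr hj)]
          rw [show (8 + (j - 8)) = j from by omega]
          have hd : decide (j < 8) = false := by simp [Nat.not_lt.mpr hj]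
          rw [hd]
          cases pvBit old j <;> cases pvBit nw j <;>
            cases pvBit (pvBM (mask >>> (1:Nat))) (j - 8) <;> rfl

-- the byte mask computed by A's loop shape equals the one of B's recursion shape
theorem pvLoopB_eq_bm (mask : Int) : ∀ fuel (m1 shift i : Nat) (hm : 0 < m1),
    m1 = 2 ^ i → shift = 8 * i → mask.toNat + 1 - m1 = fuel →
    pvLoopB mask 0 m1 shift hm = (pvBM (mask >>> i)) <<< shift := by
  intro fuel
  induction fuel using Nat.strong_induction_on with
  | _ fuel ih =>
    intro m1 shift i hm hm1 hs hf
    conv_lhs => rw [pvLoopB]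
    by_cases h : (m1 : Int) ≤ mask
    · simp only [dif_pos h]
      have hlt : mask.toNat + 1 - (m1 <<< 1) < fuel := by
        have : 0 < mask := by omega
        simp only [Nat.shiftLeft_eq]
        omega
      have he1 : m1 <<< 1 = 2 ^ (i + 1) := by
        rw [Nat.shiftLeft_eq, hm1, pow_one, pow_succ]
      have he2 : shift + 8 = 8 * (i + 1) := by omega
      have hsh : ¬ (mask >>> i ≤ 0) := by
        rcases mask with m | m
        · have hmle : 2 ^ i ≤ m := by
            rw [hm1, pv_ofNat_cast m] at h
            exact_mod_cast h
          rw [show (Int.ofNat m) >>> i = Int.ofNat (m >>> i) from rfl]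
          have hp : 0 < m >>> i := by
            rw [Nat.shiftRight_eq_div_pow]
            exact Nat.div_pos hmle (Nat.two_pow_pos i)
          rw [pv_ofNat_cast]
          exact not_le.mpr (by exact_mod_cast hp)
        · exfalso
          have h0 : (0:Int) ≤ (m1 : Int) := Int.natCast_nonneg m1
          have h2 := Int.negSucc_lt_zero m
          omega
      have hbm : pvBM (mask >>> i)
          = PySem.Int.bor ((pvBM (mask >>> (i + 1))) <<< (8:Nat))
              (if PySem.Int.band (mask >>> i) 1 ≠ 0 then (255 : Int) else 0) := by
        conv_lhs => rw [pvBM]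
        rw [dif_neg hsh, pv_srr]
      have hcond : (PySem.Int.band mask (m1 : Int) ≠ 0) ↔ (PySem.Int.band (mask >>> i) 1 ≠ 0) := by
        rw [show ((m1 : Nat) : Int) = (((2 ^ i : Nat)) : Int) from by rw [hm1]]
        rw [pv_cond_pow2, pv_band_one]
        have : pvBit (mask >>> i) 0 = pvBit mask i := by
          rw [pvBit_shiftRight, Nat.add_zero]
        rw [this]
        cases h' : pvBit mask i <;> simp
      by_cases hc : PySem.Int.band mask (m1 : Int) ≠ 0
      · rw [if_pos hc]
        rw [pvLoopB_acc mask (mask.toNat + 1 - (m1 <<< 1)) (m1 <<< 1) (shift + 8)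
          (PySem.Int.bor 0 ((0xff : Int) <<< shift)) _ rfl]
        rw [pv_bor_zero_left]
        rw [ih _ hlt (m1 <<< 1) (shift + 8) (i + 1) _ he1 he2 rfl]
        rw [hbm, if_pos (hcond.mp hc)]
        rw [pv_bor_sl, pv_sll]
        rw [show (8 + shift) = shift + 8 from by omega]
        rw [PySem.Int.bor_comm]
      · rw [if_neg hc]
        rw [ih _ hlt (m1 <<< 1) (shift + 8) (i + 1) _ he1 he2 rfl]
        rw [hbm, if_neg (fun hx => hc (hcond.mpr hx))]
        rw [PySem.Int.bor_zero, pv_sll]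
        rw [show (8 + shift) = shift + 8 from by omega]
    · simp only [dif_neg h]
      have hsh : mask >>> i ≤ 0 := by
        rcases mask with m | m
        · have hmlt : m < 2 ^ i := by
            rw [hm1, pv_ofNat_cast m] at h
            exact_mod_cast not_le.mp h
          rw [show (Int.ofNat m) >>> i = Int.ofNat (m >>> i) from rfl]
          rw [show m >>> i = 0 from by rw [Nat.shiftRight_eq_div_pow]; exact Nat.div_eq_of_lt hmlt]
          exact le_refl 0
        · exact (Int.negSucc_lt_zero _).le
      rw [pvBM, dif_pos hsh, pv_zero_sl]

-- ===== VERDICT (by name: the statement is the Claim_ definition above) =====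
theorem byte_mask_update_spec : Claim_equal_byte_mask_update := by
  intro old mask new bitmask _hdom
  show byte_mask_update old mask new bitmask = byte_mask_update_alt old mask new bitmask
  simp only [byte_mask_update, byte_mask_update_alt]
  have hA := pv_loop_eq mask
    (PySem.Int.bor (PySem.Int.band new bitmask) (PySem.Int.band old (Int.not bitmask)))
    mask.toNat 1 0 old (by decide) (by omega)
  have hL := pvLoopB_eq_bm mask mask.toNat 1 0 0 (by decide) (by norm_num) (by norm_num) (by omega)
  have hM := pvMerge_eq mask.toNat mask old
    (PySem.Int.bor (PySem.Int.band new bitmask) (PySem.Int.band old (Int.not bitmask))) rfl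
  rw [pv_sr_zero, pv_sl_zero] at hL
  rw [hL] at hA
  rw [hM]
  simpa using hA
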